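-- pv_equiv track=rewrite | github.com/hspark8494/problem_solving | 프로그래머스/unrated/133499. 옹알이 （2）/옹알이 （2）.py | solution
-- ===== SOURCE A (Python) =====
-- def solution(babbling):
--     s = set(["aya", "ye", "woo", "ma"])
--     r = 0
--     for babbb in babbling:
--         curr, pre = "", ""
--         for b in babbb:
--             curr += b
--             if curr in s and curr != pre:
--                 pre = curr
--                 curr = ""
--         if curr == "":
--             r += 1
--
--     return r
-- ===== SOURCE B (Python) =====
-- def ok(w, pre):
--     if w == "":
--         return True
--     if pre != "aya" and w.startswith("aya"):
--         return ok(w[3:], "aya")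
--     if pre != "ye" and w.startswith("ye"):
--         return ok(w[2:], "ye")
--     if pre != "woo" and w.startswith("woo"):
--         return ok(w[3:], "woo")
--     if pre != "ma" and w.startswith("ma"):
--         return ok(w[2:], "ma")
--     return False
--
--
-- def solution(babbling):
--     return sum(1 for w in babbling if ok(w, ""))
-- ===== Notes on version B (the rewrite author's own statement) =====
-- stated objective: alternative
-- what changed: Replaced the character-accumulating greedy scanner (building curr char by char and resetting on set membership) with a token-level recursive recognizer that matches one of the four prefix-free tokens at the front (skipping a token equal to the previous one) and recurses on the rest.
import Mathlib
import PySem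

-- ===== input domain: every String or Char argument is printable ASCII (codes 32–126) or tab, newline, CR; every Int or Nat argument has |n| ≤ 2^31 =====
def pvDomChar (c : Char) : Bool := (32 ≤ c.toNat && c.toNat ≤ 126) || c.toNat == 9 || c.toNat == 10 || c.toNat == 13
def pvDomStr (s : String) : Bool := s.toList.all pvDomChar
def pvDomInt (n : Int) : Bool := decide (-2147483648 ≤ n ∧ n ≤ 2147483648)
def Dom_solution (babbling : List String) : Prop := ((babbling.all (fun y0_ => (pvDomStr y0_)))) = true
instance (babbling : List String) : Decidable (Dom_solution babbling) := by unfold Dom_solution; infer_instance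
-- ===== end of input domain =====

-- B replaces A's char-by-char greedy accumulator with a token-level recursive recognizer (alternative decomposition, same cost).

-- ===== PORT A =====
-- the four babbling tokens as char lists (curr is accumulated as a list of chars; exact for strings)
def pvA : List Char := ['a', 'y', 'a']
def pvY : List Char := ['y', 'e']
def pvW : List Char := ['w', 'o', 'o']
def pvM : List Char := ['m', 'a']
def pvTokSet : PySem.Set (List Char) := PySem.Set.ofList [pvA, pvY, pvW, pvM]
-- one step of A's inner loop: curr += b; if curr in s and curr != pre: pre, curr = curr, ""; port is exact
def pvStep (cp : List Char × List Char) (b : Char) : List Char × List Char :=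
  let curr := cp.1 ++ [b]
  if pvTokSet.contains curr = true ∧ curr ≠ cp.2 then ([], curr) else (curr, cp.2)

-- r = 0; for babbb in babbling: run the inner scan from ("", ""); if curr == "": r += 1
def solution (babbling : List String) : Int :=
  babbling.foldl
    (fun r babbb =>
      let st := babbb.toList.foldl pvStep ([], [])
      if st.1 = [] then r + 1 else r)
    0

-- ===== PORT B =====
-- ok(w, pre) of Source B: match one of the four prefix-free tokens (≠ pre) at the front of w and recurse on the rest
def pvOk (w pre : List Char) : Bool :=
  if w = [] then true
  else if h1 : pre ≠ pvA ∧ pvA.isPrefixOf w then pvOk (w.drop 3) pvA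
  else if h2 : pre ≠ pvY ∧ pvY.isPrefixOf w then pvOk (w.drop 2) pvY
  else if h3 : pre ≠ pvW ∧ pvW.isPrefixOf w then pvOk (w.drop 3) pvW
  else if h4 : pre ≠ pvM ∧ pvM.isPrefixOf w then pvOk (w.drop 2) pvM
  else false
termination_by w.length
decreasing_by
  · have := (List.isPrefixOf_iff_prefix.mp h1.2).length_le; simp [pvA] at this; simp; omega
  · have := (List.isPrefixOf_iff_prefix.mp h2.2).length_le; simp [pvY] at this; simp; omega
  · have := (List.isPrefixOf_iff_prefix.mp h3.2).length_le; simp [pvW] at this; simp; omega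
  · have := (List.isPrefixOf_iff_prefix.mp h4.2).length_le; simp [pvM] at this; simp; omega

-- sum(1 for w in babbling if ok(w, "")) : count of accepted words
def solution_alt (babbling : List String) : Int :=
  ((babbling.countP (fun w => pvOk w.toList [])) : Int)

-- ===== PRECONDITION & SPEC =====
def Spec_solution (babbling : List String) (out : Int) : Prop := out = solution_alt babbling
instance (babbling : List String) (out : Int) : Decidable (Spec_solution babbling out) := by unfold Spec_solution; infer_instance

-- ===== CLAIM (what is proved, stated in full; the proofs are below) =====
def Claim_equal_solution : Prop := ∀ (babbling : List String), Dom_solution babbling → Spec_solution babbling (solution babbling)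

-- ===== LEMMAS AND PROOFS =====

lemma mem_tok (x : List Char) :
    (x ∈ pvTokSet) ↔ (x = pvA ∨ x = pvY ∨ x = pvW ∨ x = pvM) := by
  have h : pvTokSet = [pvA, pvY, pvW, pvM] := by decide
  rw [h]; simp
lemma pv_junk : ∀ (w curr p : List Char), curr ≠ [] →
    ¬ curr <+: pvA → ¬ curr <+: pvY → ¬ curr <+: pvW → ¬ curr <+: pvM →
    (w.foldl pvStep (curr, p)).1 ≠ [] := by
  intro w
  induction w with
  | nil => intro curr p h _ _ _ _; simpa using h
  | cons c w ih =>
    intro curr p h hA hY hW hM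
    have hpre : curr <+: curr ++ [c] := List.prefix_append curr [c]
    have hcond : ¬ (pvTokSet.contains (curr ++ [c]) = true ∧ curr ++ [c] ≠ p) := by
      rintro ⟨hc, -⟩
      have : curr ++ [c] ∈ pvTokSet := by
        simpa [PySem.Set.contains] using hc
      rcases (mem_tok _).mp this with h1 | h1 | h1 | h1 <;> rw [h1] at hpre
      · exact hA hpre
      · exact hY hpre
      · exact hW hpre
      · exact hM hpre
    have hstep : pvStep (curr, p) c = (curr ++ [c], p) := by
      simp only [pvStep, if_neg hcond]
    rw [List.foldl_cons, hstep]
    exact ih (curr ++ [c]) p (by simp)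
      (fun hx => hA (hpre.trans hx)) (fun hx => hY (hpre.trans hx))
      (fun hx => hW (hpre.trans hx)) (fun hx => hM (hpre.trans hx))

lemma fail_iff {w p : List Char} (h1 : (w.foldl pvStep ([], p)).1 ≠ [])
    (h2 : pvOk w p = false) :
    (((w.foldl pvStep ([], p)).1 = []) ↔ pvOk w p = true) :=
  iff_of_false h1 (by simp [h2])

lemma pv_main : ∀ (n : Nat) (w p : List Char), w.length ≤ n →
    (((w.foldl pvStep ([], p)).1 = []) ↔ pvOk w p = true) := by
  intro n
  induction n with
  | zero =>
    intro w p hlen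
    have : w = [] := List.length_eq_zero_iff.mp (Nat.le_zero.mp hlen)
    subst this; simp [pvOk]
  | succ n ih =>
    intro w p hlen
    match w with
    | [] => simp [pvOk]
    | c :: w1 =>
    by_cases hca : c = 'a'
    · subst hca
      match w1 with
      | [] =>
        refine fail_iff ?_ ?_
        · rw [show ('a'::([] : List Char)).foldl pvStep ([], p) = (['a'], p) by
            simp [pvStep, PySem.Set.contains, mem_tok, pvA, pvY, pvW, pvM]]
          simp
        · rw [pvOk]; simp [pvA, pvY, pvW, pvM, List.isPrefixOf]
      | c2 :: w2 =>
        by_cases hc2 : c2 = 'y'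
        · subst hc2
          match w2 with
          | [] =>
            refine fail_iff ?_ ?_
            · simp only [List.foldl_cons]
              rw [show pvStep ([], p) 'a' = (['a'], p) by
                  simp [pvStep, PySem.Set.contains, mem_tok, pvA, pvY, pvW, pvM],
                show pvStep (['a'], p) 'y' = (['a','y'], p) by
                  simp [pvStep, PySem.Set.contains, mem_tok, pvA, pvY, pvW, pvM]]
              simp
            · rw [pvOk]; simp [pvA, pvY, pvW, pvM, List.isPrefixOf]
          | c3 :: w3 =>
            by_cases hc3 : c3 = 'a'
            · subst hc3
              by_cases hp : p = pvA
              · subst hp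
                refine fail_iff ?_ ?_
                · simp only [List.foldl_cons]
                  rw [show pvStep ([], pvA) 'a' = (['a'], pvA) by
                      simp [pvStep, PySem.Set.contains, mem_tok, pvA, pvY, pvW, pvM],
                    show pvStep (['a'], pvA) 'y' = (['a','y'], pvA) by
                      simp [pvStep, PySem.Set.contains, mem_tok, pvA, pvY, pvW, pvM],
                    show pvStep (['a','y'], pvA) 'a' = (['a','y','a'], pvA) by
                      simp [pvStep, PySem.Set.contains, mem_tok, pvA, pvY, pvW, pvM]]
                  match w3 with
                  | [] => simp
                  | c4 :: w4 =>
                    rw [List.foldl_cons,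
                      show pvStep (['a','y','a'], pvA) c4 = (['a','y','a',c4], pvA) by
                        simp [pvStep, PySem.Set.contains, mem_tok, pvA, pvY, pvW, pvM]]
                    exact pv_junk w4 _ _ (by simp)
                      (by simp [pvA, List.cons_prefix_cons])
                      (by simp [pvY, List.cons_prefix_cons])
                      (by simp [pvW, List.cons_prefix_cons])
                      (by simp [pvM, List.cons_prefix_cons])
                · rw [pvOk]; simp [pvA, pvY, pvW, pvM, List.isPrefixOf]
              · have hp' : ¬ (['a','y','a'] : List Char) = p := by simpa [pvA, eq_comm] using hp
                have hp2 : ¬ p = (['a','y','a'] : List Char) := by simpa [pvA] using hp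
                have hfold : ('a'::'y'::'a'::w3).foldl pvStep ([], p) = w3.foldl pvStep ([], pvA) := by
                  simp only [List.foldl_cons]
                  rw [show pvStep ([], p) 'a' = (['a'], p) by
                      simp [pvStep, PySem.Set.contains, mem_tok, pvA, pvY, pvW, pvM],
                    show pvStep (['a'], p) 'y' = (['a','y'], p) by
                      simp [pvStep, PySem.Set.contains, mem_tok, pvA, pvY, pvW, pvM],
                    show pvStep (['a','y'], p) 'a' = ([], pvA) by
                      simp [pvStep, PySem.Set.contains, mem_tok, pvA, pvY, pvW, pvM, hp']]
                have hok : pvOk ('a'::'y'::'a'::w3) p = pvOk w3 pvA := by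
                  rw [pvOk]; simp [List.isPrefixOf, pvA, pvY, pvW, pvM, hp2]
                rw [hfold, hok]
                exact ih w3 pvA (by simp at hlen; omega)
            · refine fail_iff ?_ ?_
              · simp only [List.foldl_cons]
                rw [show pvStep ([], p) 'a' = (['a'], p) by
                    simp [pvStep, PySem.Set.contains, mem_tok, pvA, pvY, pvW, pvM],
                  show pvStep (['a'], p) 'y' = (['a','y'], p) by
                    simp [pvStep, PySem.Set.contains, mem_tok, pvA, pvY, pvW, pvM],
                  show pvStep (['a','y'], p) c3 = (['a','y',c3], p) by
                    simp [pvStep, PySem.Set.contains, mem_tok, pvA, pvY, pvW, pvM, hc3]]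
                exact pv_junk w3 _ _ (by simp)
                  (by simp [pvA, List.cons_prefix_cons, hc3])
                  (by simp [pvY, List.cons_prefix_cons, hc3])
                  (by simp [pvW, List.cons_prefix_cons, hc3])
                  (by simp [pvM, List.cons_prefix_cons, hc3])
              · rw [pvOk]; simp [pvA, pvY, pvW, pvM, List.isPrefixOf, hc3, Ne.symm hc3]
        · refine fail_iff ?_ ?_
          · simp only [List.foldl_cons]
            rw [show pvStep ([], p) 'a' = (['a'], p) by
                simp [pvStep, PySem.Set.contains, mem_tok, pvA, pvY, pvW, pvM],
              show pvStep (['a'], p) c2 = (['a',c2], p) by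
                simp [pvStep, PySem.Set.contains, mem_tok, pvA, pvY, pvW, pvM, hc2]]
            exact pv_junk w2 _ _ (by simp)
              (by simp [pvA, List.cons_prefix_cons, hc2])
              (by simp [pvY, List.cons_prefix_cons, hc2])
              (by simp [pvW, List.cons_prefix_cons, hc2])
              (by simp [pvM, List.cons_prefix_cons, hc2])
          · rw [pvOk]; simp [pvA, pvY, pvW, pvM, List.isPrefixOf, hc2, Ne.symm hc2]
    · by_cases hcy : c = 'y'
      · subst hcy
        match w1 with
        | [] =>
          refine fail_iff ?_ ?_
          · rw [show ('y'::([] : List Char)).foldl pvStep ([], p) = (['y'], p) by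
              simp [pvStep, PySem.Set.contains, mem_tok, pvA, pvY, pvW, pvM]]
            simp
          · rw [pvOk]; simp [pvA, pvY, pvW, pvM, List.isPrefixOf]
        | c2 :: w2 =>
          by_cases hc2 : c2 = 'e'
          · subst hc2
            by_cases hp : p = pvY
            · subst hp
              refine fail_iff ?_ ?_
              · simp only [List.foldl_cons]
                rw [show pvStep ([], pvY) 'y' = (['y'], pvY) by
                    simp [pvStep, PySem.Set.contains, mem_tok, pvA, pvY, pvW, pvM],
                  show pvStep (['y'], pvY) 'e' = (['y','e'], pvY) by
                    simp [pvStep, PySem.Set.contains, mem_tok, pvA, pvY, pvW, pvM]]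
                match w2 with
                | [] => simp
                | c3 :: w3 =>
                  rw [List.foldl_cons,
                    show pvStep (['y','e'], pvY) c3 = (['y','e',c3], pvY) by
                      simp [pvStep, PySem.Set.contains, mem_tok, pvA, pvY, pvW, pvM]]
                  exact pv_junk w3 _ _ (by simp)
                    (by simp [pvA, List.cons_prefix_cons])
                    (by simp [pvY, List.cons_prefix_cons])
                    (by simp [pvW, List.cons_prefix_cons])
                    (by simp [pvM, List.cons_prefix_cons])
              · rw [pvOk]; simp [pvA, pvY, pvW, pvM, List.isPrefixOf]
            · have hp' : ¬ (['y','e'] : List Char) = p := by simpa [pvY, eq_comm] using hp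
              have hp2 : ¬ p = (['y','e'] : List Char) := by simpa [pvY] using hp
              have hfold : ('y'::'e'::w2).foldl pvStep ([], p) = w2.foldl pvStep ([], pvY) := by
                simp only [List.foldl_cons]
                rw [show pvStep ([], p) 'y' = (['y'], p) by
                    simp [pvStep, PySem.Set.contains, mem_tok, pvA, pvY, pvW, pvM],
                  show pvStep (['y'], p) 'e' = ([], pvY) by
                    simp [pvStep, PySem.Set.contains, mem_tok, pvA, pvY, pvW, pvM, hp']]
              have hok : pvOk ('y'::'e'::w2) p = pvOk w2 pvY := by
                rw [pvOk]; simp [List.isPrefixOf, pvA, pvY, pvW, pvM, hp2]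
              rw [hfold, hok]
              exact ih w2 pvY (by simp at hlen; omega)
          · refine fail_iff ?_ ?_
            · simp only [List.foldl_cons]
              rw [show pvStep ([], p) 'y' = (['y'], p) by
                  simp [pvStep, PySem.Set.contains, mem_tok, pvA, pvY, pvW, pvM],
                show pvStep (['y'], p) c2 = (['y',c2], p) by
                  simp [pvStep, PySem.Set.contains, mem_tok, pvA, pvY, pvW, pvM, hc2]]
              exact pv_junk w2 _ _ (by simp)
                (by simp [pvA, List.cons_prefix_cons, hc2])
                (by simp [pvY, List.cons_prefix_cons, hc2])
                (by simp [pvW, List.cons_prefix_cons, hc2])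
                (by simp [pvM, List.cons_prefix_cons, hc2])
            · rw [pvOk]; simp [pvA, pvY, pvW, pvM, List.isPrefixOf, hc2, Ne.symm hc2]
      · by_cases hcw : c = 'w'
        · subst hcw
          match w1 with
          | [] =>
            refine fail_iff ?_ ?_
            · rw [show ('w'::([] : List Char)).foldl pvStep ([], p) = (['w'], p) by
                simp [pvStep, PySem.Set.contains, mem_tok, pvA, pvY, pvW, pvM]]
              simp
            · rw [pvOk]; simp [pvA, pvY, pvW, pvM, List.isPrefixOf]
          | c2 :: w2 =>
            by_cases hc2 : c2 = 'o'
            · subst hc2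
              match w2 with
              | [] =>
                refine fail_iff ?_ ?_
                · simp only [List.foldl_cons]
                  rw [show pvStep ([], p) 'w' = (['w'], p) by
                      simp [pvStep, PySem.Set.contains, mem_tok, pvA, pvY, pvW, pvM],
                    show pvStep (['w'], p) 'o' = (['w','o'], p) by
                      simp [pvStep, PySem.Set.contains, mem_tok, pvA, pvY, pvW, pvM]]
                  simp
                · rw [pvOk]; simp [pvA, pvY, pvW, pvM, List.isPrefixOf]
              | c3 :: w3 =>
                by_cases hc3 : c3 = 'o'
                · subst hc3
                  by_cases hp : p = pvW
                  · subst hp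
                    refine fail_iff ?_ ?_
                    · simp only [List.foldl_cons]
                      rw [show pvStep ([], pvW) 'w' = (['w'], pvW) by
                          simp [pvStep, PySem.Set.contains, mem_tok, pvA, pvY, pvW, pvM],
                        show pvStep (['w'], pvW) 'o' = (['w','o'], pvW) by
                          simp [pvStep, PySem.Set.contains, mem_tok, pvA, pvY, pvW, pvM],
                        show pvStep (['w','o'], pvW) 'o' = (['w','o','o'], pvW) by
                          simp [pvStep, PySem.Set.contains, mem_tok, pvA, pvY, pvW, pvM]]
                      match w3 with
                      | [] => simp
                      | c4 :: w4 =>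
                        rw [List.foldl_cons,
                          show pvStep (['w','o','o'], pvW) c4 = (['w','o','o',c4], pvW) by
                            simp [pvStep, PySem.Set.contains, mem_tok, pvA, pvY, pvW, pvM]]
                        exact pv_junk w4 _ _ (by simp)
                          (by simp [pvA, List.cons_prefix_cons])
                          (by simp [pvY, List.cons_prefix_cons])
                          (by simp [pvW, List.cons_prefix_cons])
                          (by simp [pvM, List.cons_prefix_cons])
                    · rw [pvOk]; simp [pvA, pvY, pvW, pvM, List.isPrefixOf]
                  · have hp' : ¬ (['w','o','o'] : List Char) = p := by simpa [pvW, eq_comm] using hp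
                    have hp2 : ¬ p = (['w','o','o'] : List Char) := by simpa [pvW] using hp
                    have hfold : ('w'::'o'::'o'::w3).foldl pvStep ([], p) = w3.foldl pvStep ([], pvW) := by
                      simp only [List.foldl_cons]
                      rw [show pvStep ([], p) 'w' = (['w'], p) by
                          simp [pvStep, PySem.Set.contains, mem_tok, pvA, pvY, pvW, pvM],
                        show pvStep (['w'], p) 'o' = (['w','o'], p) by
                          simp [pvStep, PySem.Set.contains, mem_tok, pvA, pvY, pvW, pvM],
                        show pvStep (['w','o'], p) 'o' = ([], pvW) by
                          simp [pvStep, PySem.Set.contains, mem_tok, pvA, pvY, pvW, pvM, hp']]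
                    have hok : pvOk ('w'::'o'::'o'::w3) p = pvOk w3 pvW := by
                      rw [pvOk]; simp [List.isPrefixOf, pvA, pvY, pvW, pvM, hp2]
                    rw [hfold, hok]
                    exact ih w3 pvW (by simp at hlen; omega)
                · refine fail_iff ?_ ?_
                  · simp only [List.foldl_cons]
                    rw [show pvStep ([], p) 'w' = (['w'], p) by
                        simp [pvStep, PySem.Set.contains, mem_tok, pvA, pvY, pvW, pvM],
                      show pvStep (['w'], p) 'o' = (['w','o'], p) by
                        simp [pvStep, PySem.Set.contains, mem_tok, pvA, pvY, pvW, pvM],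
                      show pvStep (['w','o'], p) c3 = (['w','o',c3], p) by
                        simp [pvStep, PySem.Set.contains, mem_tok, pvA, pvY, pvW, pvM, hc3]]
                    exact pv_junk w3 _ _ (by simp)
                      (by simp [pvA, List.cons_prefix_cons, hc3])
                      (by simp [pvY, List.cons_prefix_cons, hc3])
                      (by simp [pvW, List.cons_prefix_cons, hc3])
                      (by simp [pvM, List.cons_prefix_cons, hc3])
                  · rw [pvOk]; simp [pvA, pvY, pvW, pvM, List.isPrefixOf, hc3, Ne.symm hc3]
            · refine fail_iff ?_ ?_
              · simp only [List.foldl_cons]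
                rw [show pvStep ([], p) 'w' = (['w'], p) by
                    simp [pvStep, PySem.Set.contains, mem_tok, pvA, pvY, pvW, pvM],
                  show pvStep (['w'], p) c2 = (['w',c2], p) by
                    simp [pvStep, PySem.Set.contains, mem_tok, pvA, pvY, pvW, pvM, hc2]]
                exact pv_junk w2 _ _ (by simp)
                  (by simp [pvA, List.cons_prefix_cons, hc2])
                  (by simp [pvY, List.cons_prefix_cons, hc2])
                  (by simp [pvW, List.cons_prefix_cons, hc2])
                  (by simp [pvM, List.cons_prefix_cons, hc2])
              · rw [pvOk]; simp [pvA, pvY, pvW, pvM, List.isPrefixOf, hc2, Ne.symm hc2]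
        · by_cases hcm : c = 'm'
          · subst hcm
            match w1 with
            | [] =>
              refine fail_iff ?_ ?_
              · rw [show ('m'::([] : List Char)).foldl pvStep ([], p) = (['m'], p) by
                  simp [pvStep, PySem.Set.contains, mem_tok, pvA, pvY, pvW, pvM]]
                simp
              · rw [pvOk]; simp [pvA, pvY, pvW, pvM, List.isPrefixOf]
            | c2 :: w2 =>
              by_cases hc2 : c2 = 'a'
              · subst hc2
                by_cases hp : p = pvM
                · subst hp
                  refine fail_iff ?_ ?_
                  · simp only [List.foldl_cons]
                    rw [show pvStep ([], pvM) 'm' = (['m'], pvM) by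
                        simp [pvStep, PySem.Set.contains, mem_tok, pvA, pvY, pvW, pvM],
                      show pvStep (['m'], pvM) 'a' = (['m','a'], pvM) by
                        simp [pvStep, PySem.Set.contains, mem_tok, pvA, pvY, pvW, pvM]]
                    match w2 with
                    | [] => simp
                    | c3 :: w3 =>
                      rw [List.foldl_cons,
                        show pvStep (['m','a'], pvM) c3 = (['m','a',c3], pvM) by
                          simp [pvStep, PySem.Set.contains, mem_tok, pvA, pvY, pvW, pvM]]
                      exact pv_junk w3 _ _ (by simp)
                        (by simp [pvA, List.cons_prefix_cons])
                        (by simp [pvY, List.cons_prefix_cons])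
                        (by simp [pvW, List.cons_prefix_cons])
                        (by simp [pvM, List.cons_prefix_cons])
                  · rw [pvOk]; simp [pvA, pvY, pvW, pvM, List.isPrefixOf]
                · have hp' : ¬ (['m','a'] : List Char) = p := by simpa [pvM, eq_comm] using hp
                  have hp2 : ¬ p = (['m','a'] : List Char) := by simpa [pvM] using hp
                  have hfold : ('m'::'a'::w2).foldl pvStep ([], p) = w2.foldl pvStep ([], pvM) := by
                    simp only [List.foldl_cons]
                    rw [show pvStep ([], p) 'm' = (['m'], p) by
                        simp [pvStep, PySem.Set.contains, mem_tok, pvA, pvY, pvW, pvM],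
                      show pvStep (['m'], p) 'a' = ([], pvM) by
                        simp [pvStep, PySem.Set.contains, mem_tok, pvA, pvY, pvW, pvM, hp']]
                  have hok : pvOk ('m'::'a'::w2) p = pvOk w2 pvM := by
                    rw [pvOk]; simp [List.isPrefixOf, pvA, pvY, pvW, pvM, hp2]
                  rw [hfold, hok]
                  exact ih w2 pvM (by simp at hlen; omega)
              · refine fail_iff ?_ ?_
                · simp only [List.foldl_cons]
                  rw [show pvStep ([], p) 'm' = (['m'], p) by
                      simp [pvStep, PySem.Set.contains, mem_tok, pvA, pvY, pvW, pvM],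
                    show pvStep (['m'], p) c2 = (['m',c2], p) by
                      simp [pvStep, PySem.Set.contains, mem_tok, pvA, pvY, pvW, pvM, hc2]]
                  exact pv_junk w2 _ _ (by simp)
                    (by simp [pvA, List.cons_prefix_cons, hc2])
                    (by simp [pvY, List.cons_prefix_cons, hc2])
                    (by simp [pvW, List.cons_prefix_cons, hc2])
                    (by simp [pvM, List.cons_prefix_cons, hc2])
                · rw [pvOk]; simp [pvA, pvY, pvW, pvM, List.isPrefixOf, hc2, Ne.symm hc2]
          · refine fail_iff ?_ ?_
            · rw [List.foldl_cons,
                show pvStep ([], p) c = ([c], p) by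
                  simp [pvStep, PySem.Set.contains, mem_tok, pvA, pvY, pvW, pvM]]
              exact pv_junk w1 _ _ (by simp)
                (by simp [pvA, List.cons_prefix_cons, hca])
                (by simp [pvY, List.cons_prefix_cons, hcy])
                (by simp [pvW, List.cons_prefix_cons, hcw])
                (by simp [pvM, List.cons_prefix_cons, hcm])
            · rw [pvOk]
              simp [pvA, pvY, pvW, pvM, List.isPrefixOf, hca, hcy, hcw, hcm,
                Ne.symm hca, Ne.symm hcy, Ne.symm hcw, Ne.symm hcm]

lemma pv_count : ∀ (l : List String) (r : Int),
    l.foldl (fun r babbb =>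
      let st := babbb.toList.foldl pvStep ([], [])
      if st.1 = [] then r + 1 else r) r
      = r + ((l.countP (fun w => pvOk w.toList [])) : Int) := by
  intro l
  induction l with
  | nil => simp
  | cons w l ih =>
    intro r
    simp only [List.foldl_cons, List.countP_cons, ih]
    by_cases h : (w.toList.foldl pvStep ([], [])).1 = []
    · rw [if_pos h]
      have hb : pvOk w.toList [] = true := (pv_main w.toList.length w.toList [] le_rfl).mp h
      simp [hb]; ring
    · rw [if_neg h]
      have hb : ¬ pvOk w.toList [] = true := fun hh => h ((pv_main w.toList.length w.toList [] le_rfl).mpr hh)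
      simp [hb]

-- ===== VERDICT (by name: the statement is the Claim_ definition above) =====
theorem solution_spec : Claim_equal_solution := by
  intro babbling _
  show solution babbling = solution_alt babbling
  simp [solution, solution_alt, pv_count]
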